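-- pv_equiv track=rewrite | github.com/guvenacar/Spin-Quantum-Hash | model/spin_quantum_hash.py | text_to_512_block
-- ===== SOURCE A (Python) =====
-- def text_to_512_block(input_text: str) -> str:
--     input_bytes = input_text.encode('utf-8')
--     binary_string = ''.join(f'{b:08b}' for b in input_bytes)
--     padded_binary = binary_string + '1'
--     while len(padded_binary) % 512 != 448:
--         padded_binary += '0'
--     padded_binary += f'{len(binary_string):064b}'
--     blocks = [padded_binary[i:i+512] for i in range(0, len(padded_binary), 512)]
--     if len(blocks) == 1:
--         return blocks[0]
--     else:
--         acc = int(blocks[0], 2)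
--         for b in blocks[1:]:
--             acc ^= int(b, 2)
--         return bin(acc)[2:].zfill(512)
-- ===== SOURCE B (Python) =====
-- def text_to_512_block(input_text: str) -> str:
--     data = input_text.encode('utf-8')
--     bit_len = 8 * len(data)
--     zeros = (448 - bit_len - 1) % 512
--     big = ((2 * int.from_bytes(data, 'big') + 1) << (zeros + 64)) + bit_len
--     nblocks = (bit_len + 1 + zeros + 64) // 512
--     mask = (1 << 512) - 1
--     acc = 0
--     for i in range(nblocks - 1, -1, -1):
--         acc ^= (big >> (512 * i)) & mask
--     return bin(acc)[2:].zfill(512)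
-- ===== Notes on version B (the rewrite author's own statement) =====
-- stated objective: alternative
-- what changed: B works in the integer domain: it computes the zero-pad width in closed form instead of A's character-append while loop, assembles the whole padded message as one big integer with shifts/adds instead of concatenating per-character bit strings, and XOR-folds 512-bit windows of that integer instead of slicing substrings and re-parsing each with int(.,2); A's single-block special case disappears because the zfilled form is identical for an exact 512-bit block. Pre_ only excludes texts of 2^61 or more characters, whose bit length would overflow the 64-bit length field; …
import Mathlib
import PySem

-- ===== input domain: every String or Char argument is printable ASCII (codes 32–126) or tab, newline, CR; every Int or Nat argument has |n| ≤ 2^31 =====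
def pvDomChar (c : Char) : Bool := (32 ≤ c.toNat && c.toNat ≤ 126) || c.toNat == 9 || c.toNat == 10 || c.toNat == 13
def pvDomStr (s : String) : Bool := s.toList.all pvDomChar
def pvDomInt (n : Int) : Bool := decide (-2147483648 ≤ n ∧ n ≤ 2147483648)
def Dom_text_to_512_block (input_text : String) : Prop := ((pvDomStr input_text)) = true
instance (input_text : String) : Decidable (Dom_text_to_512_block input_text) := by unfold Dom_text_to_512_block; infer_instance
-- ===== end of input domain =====

-- B replaces A's per-character bit-string construction, padding loop and per-block
-- int()-parsing by integer arithmetic: one big integer assembled by shifts, the pad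
-- width in closed form, and XOR-folding of 512-bit windows; objective: alternative.


-- ===== shared helpers (exact ports of the Python builtins both programs use) =====

-- s.encode('utf-8'): exact on the ASCII domain (Dom), where each char is one byte = its code
def pvBytes (s : String) : List Nat := s.toList.map Char.toNat

-- bin(n)[2:] for n ≥ 0 (also f'{n:b}'): most-significant digit first, "0" for 0;
-- structural on a fuel that is always sufficient (n halves each step, so n+1 steps suffice)
def pvBinReprF : Nat → Nat → List Char
  | 0, _ => []
  | fuel + 1, n =>
    if n < 2 then [if n = 1 then '1' else '0']
    else pvBinReprF fuel (n / 2) ++ [if n % 2 = 1 then '1' else '0']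

def pvBinRepr (n : Nat) : List Char := pvBinReprF (n + 1) n

-- str.zfill(w) on a digit string
def pvZfill (w : Nat) (l : List Char) : List Char := List.replicate (w - l.length) '0' ++ l

-- int(b, 2) on a string of '0'/'1' digits
def pvVal (l : List Char) : Nat := l.foldl (fun a c => 2 * a + (if c = '1' then 1 else 0)) 0

-- ===== PORT A =====

-- the while loop: append '0' until len % 512 == 448; structural on a fuel of 512,
-- which always suffices (fewer than 512 appends reach 448 mod 512 from any length)
def pvPadLoopF : Nat → List Char → List Char
  | 0, l => l
  | fuel + 1, l => if l.length % 512 = 448 then l else pvPadLoopF fuel (l ++ ['0'])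

def pvPadLoop (l : List Char) : List Char := pvPadLoopF 512 l

def text_to_512_block (input_text : String) : String :=
  let input_bytes := pvBytes input_text
  -- ''.join(f'{b:08b}' for b in input_bytes); each byte is < 256 so the field is 8 wide
  let binary_string := (input_bytes.map (fun b => pvZfill 8 (pvBinRepr b))).flatten
  let padded0 := pvPadLoop (binary_string ++ ['1'])
  let padded_binary := padded0 ++ pvZfill 64 (pvBinRepr binary_string.length)
  let blocks := (PySem.List.pyRange 0 padded_binary.length 512).map
    (fun i => PySem.List.slice padded_binary (some i) (some (i + 512)))
  if blocks.length = 1 then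
    String.ofList (blocks.headD [])            -- blocks[0]; blocks is never empty
  else
    let acc := (blocks.drop 1).foldl (fun a b => Nat.xor a (pvVal b)) (pvVal (blocks.headD []))
    String.ofList (pvZfill 512 (pvBinRepr acc))  -- bin(acc)[2:].zfill(512)

-- ===== PORT B =====

def text_to_512_block_alt (input_text : String) : String :=
  let data := pvBytes input_text
  let bitLen := 8 * data.length
  -- (448 - bit_len - 1) % 512 ∈ [0, 512), so toNat is exact
  let zeros := (PySem.Int.mod (448 - (bitLen : Int) - 1) 512).toNat
  -- int.from_bytes(data, 'big')
  let big := (2 * data.foldl (fun a b => 256 * a + b) 0 + 1) <<< (zeros + 64) + bitLen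
  let nblocks := (bitLen + 1 + zeros + 64) / 512   -- '//' of nonneg ints
  let mask := (1 <<< 512) - 1
  -- for i in range(nblocks - 1, -1, -1): acc ^= (big >> 512*i) & mask
  let acc := ((List.range nblocks).reverse).foldl
    (fun a i => Nat.xor a ((big >>> (512 * i)) &&& mask)) 0
  String.ofList (pvZfill 512 (pvBinRepr acc))

-- ===== PRECONDITION & SPEC =====

-- Pre_ narrows A's domain ONLY by excluding texts of 2^61 or more characters, whose
-- bit length no longer fits the 64-bit length field (A's f'{…:064b}' would silently
-- widen past 64 digits there); no such input is materializable, every realizable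
-- input is admitted.
def Pre_text_to_512_block (input_text : String) : Prop := input_text.length < 2 ^ 61
instance (input_text : String) : Decidable (Pre_text_to_512_block input_text) := by
  unfold Pre_text_to_512_block; infer_instance

def pvWitness_text_to_512_block : String := "abc"

def Spec_text_to_512_block (input_text : String) (out : String) : Prop :=
  out = text_to_512_block_alt input_text
instance (input_text : String) (out : String) : Decidable (Spec_text_to_512_block input_text out) := by
  unfold Spec_text_to_512_block; infer_instance

-- ===== CLAIM (what is proved, stated in full; the proofs are below) =====
def Claim_equal_text_to_512_block : Prop := ∀ (input_text : String), Dom_text_to_512_block input_text → Pre_text_to_512_block input_text → Spec_text_to_512_block input_text (text_to_512_block input_text)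

-- ===== LEMMAS AND PROOFS =====

def pvIsBin (l : List Char) : Prop := ∀ c ∈ l, c = '0' ∨ c = '1'

theorem pv_binReprF_congr : ∀ (f1 f2 n : Nat), n < f1 → n < f2 →
    pvBinReprF f1 n = pvBinReprF f2 n := by
  intro f1
  induction f1 with
  | zero => intro f2 n h1 h2; omega
  | succ f1 ih =>
    intro f2 n h1 h2
    cases f2 with
    | zero => omega
    | succ f2 =>
      simp only [pvBinReprF]
      split
      · rfl
      · rw [ih f2 (n / 2) (by omega) (by omega)]

theorem pv_binRepr_eq (n : Nat) : pvBinRepr n =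
    (if n < 2 then [if n = 1 then '1' else '0']
     else pvBinRepr (n / 2) ++ [if n % 2 = 1 then '1' else '0']) := by
  show pvBinReprF (n + 1) n = _
  rw [show pvBinReprF (n + 1) n = if n < 2 then [if n = 1 then '1' else '0']
      else pvBinReprF n (n / 2) ++ [if n % 2 = 1 then '1' else '0'] from rfl]
  split
  · rfl
  · rw [pv_binReprF_congr n (n / 2 + 1) (n / 2) (by omega) (by omega)]
    rfl

theorem pv_foldl_val (l : List Char) (a : Nat) :
    l.foldl (fun a c => 2 * a + (if c = '1' then 1 else 0)) a = a * 2 ^ l.length + pvVal l := by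
  induction l generalizing a with
  | nil => simp [pvVal]
  | cons c t ih =>
    simp only [List.foldl_cons, List.length_cons]
    rw [ih]
    have h2 : pvVal (c :: t) = (if c = '1' then 1 else 0) * 2 ^ t.length + pvVal t := by
      simp only [pvVal, List.foldl_cons]
      rw [ih (2 * 0 + if c = '1' then 1 else 0)]
      simp [pvVal]
    rw [h2]; ring

theorem pv_val_cons (c : Char) (t : List Char) :
    pvVal (c :: t) = (if c = '1' then 1 else 0) * 2 ^ t.length + pvVal t := by
  simp only [pvVal, List.foldl_cons]
  rw [pv_foldl_val t (2 * 0 + if c = '1' then 1 else 0)]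
  simp [pvVal]

theorem pv_val_append (x y : List Char) :
    pvVal (x ++ y) = pvVal x * 2 ^ y.length + pvVal y := by
  simp only [pvVal, List.foldl_append]
  rw [pv_foldl_val y (x.foldl _ 0)]
  simp [pvVal]

theorem pv_val_lt (l : List Char) (h : pvIsBin l) : pvVal l < 2 ^ l.length := by
  induction l with
  | nil => simp [pvVal]
  | cons c t ih =>
    have ht : pvVal t < 2 ^ t.length := ih (fun x hx => h x (List.mem_cons_of_mem _ hx))
    rw [pv_val_cons]
    have hp : 2 ^ (c :: t).length = 2 ^ t.length + 2 ^ t.length := by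
      simp [List.length_cons, pow_succ]; ring
    rw [hp]
    split <;> omega

theorem pv_binRepr_val (n : Nat) : pvVal (pvBinRepr n) = n := by
  induction n using Nat.strong_induction_on with
  | _ n ih =>
    rw [pv_binRepr_eq]
    split
    · have : n = 0 ∨ n = 1 := by omega
      rcases this with h | h <;> subst h <;> decide
    · rw [pv_val_append]
      rw [ih (n / 2) (Nat.div_lt_self (by omega) (by omega))]
      have h2 : n % 2 = 0 ∨ n % 2 = 1 := by omega
      rcases h2 with h2 | h2 <;> simp [h2, pvVal] <;> omega

theorem pv_binRepr_isBin (n : Nat) : pvIsBin (pvBinRepr n) := by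
  induction n using Nat.strong_induction_on with
  | _ n ih =>
    rw [pv_binRepr_eq]
    split
    · intro c hc
      simp only [List.mem_singleton] at hc
      subst hc; split <;> simp
    · intro c hc
      rcases List.mem_append.1 hc with h | h
      · exact ih (n / 2) (Nat.div_lt_self (by omega) (by omega)) c h
      · simp only [List.mem_singleton] at h
        subst h; split <;> simp

theorem pv_binRepr_len_le (n w : Nat) (hw : 1 ≤ w) (h : n < 2 ^ w) :
    (pvBinRepr n).length ≤ w := by
  induction n using Nat.strong_induction_on generalizing w with
  | _ n ih =>
    rw [pv_binRepr_eq]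
    split
    · simpa using hw
    · rename_i hn
      have hw2 : 2 ≤ w := by
        by_contra hc
        have : w = 1 := by omega
        subst this; omega
      have hpow : 2 ^ w = 2 * 2 ^ (w - 1) := by
        rw [← pow_succ']
        congr 1
        omega
      have hdiv : n / 2 < 2 ^ (w - 1) := by omega
      have := ih (n / 2) (Nat.div_lt_self (by omega) (by omega)) (w - 1) (by omega) hdiv
      simp only [List.length_append, List.length_cons, List.length_nil]
      omega

theorem pv_val_replicate (k : Nat) : pvVal (List.replicate k '0') = 0 := by
  induction k with
  | zero => rfl
  | succ k ih => rw [List.replicate_succ, pv_val_cons, ih]; simp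

theorem pv_val_zfill (w : Nat) (l : List Char) : pvVal (pvZfill w l) = pvVal l := by
  unfold pvZfill
  rw [pv_val_append, pv_val_replicate]
  simp

theorem pv_len_zfill (w : Nat) (l : List Char) (h : l.length ≤ w) :
    (pvZfill w l).length = w := by
  simp [pvZfill]
  omega

theorem pv_isBin_zfill (w : Nat) (l : List Char) (h : pvIsBin l) : pvIsBin (pvZfill w l) := by
  intro c hc
  rcases List.mem_append.1 hc with h1 | h1
  · left; exact (List.eq_of_mem_replicate h1)
  · exact h c h1

theorem pv_val_inj (x y : List Char) (hx : pvIsBin x) (hy : pvIsBin y)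
    (hlen : x.length = y.length) (hval : pvVal x = pvVal y) : x = y := by
  induction x generalizing y with
  | nil =>
    cases y with
    | nil => rfl
    | cons d u => simp at hlen
  | cons c t ih =>
    cases y with
    | nil => simp at hlen
    | cons d u =>
      simp only [List.length_cons, Nat.add_right_cancel_iff] at hlen
      rw [pv_val_cons, pv_val_cons, hlen] at hval
      have hvt : pvVal t < 2 ^ u.length := hlen ▸ pv_val_lt t (fun a ha => hx a (List.mem_cons_of_mem _ ha))
      have hvu : pvVal u < 2 ^ u.length := pv_val_lt u (fun a ha => hy a (List.mem_cons_of_mem _ ha))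
      have hc := hx c List.mem_cons_self
      have hd := hy d List.mem_cons_self
      have heq : c = d ∧ pvVal t = pvVal u := by
        rcases hc with hc | hc <;> rcases hd with hd | hd <;> subst hc <;> subst hd <;>
          simp at hval <;>
          first
            | exact ⟨rfl, by omega⟩
            | exact False.elim (by omega)
      rw [heq.1, ih u (fun a ha => hx a (List.mem_cons_of_mem _ ha))
        (fun a ha => hy a (List.mem_cons_of_mem _ ha)) hlen heq.2]

theorem pv_canon (l : List Char) (w : Nat) (hw : 1 ≤ w) (hb : pvIsBin l)
    (hl : l.length = w) : pvZfill w (pvBinRepr (pvVal l)) = l := by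
  have hvl : pvVal l < 2 ^ w := hl ▸ pv_val_lt l hb
  have hlen : (pvBinRepr (pvVal l)).length ≤ w := pv_binRepr_len_le _ w hw hvl
  apply pv_val_inj
  · exact pv_isBin_zfill _ _ (pv_binRepr_isBin _)
  · exact hb
  · rw [pv_len_zfill _ _ hlen, hl]
  · rw [pv_val_zfill, pv_binRepr_val]

-- closed form of the padding loop
theorem pv_padLoopF_eq (fuel : Nat) : ∀ l : List Char,
    (960 - l.length % 512) % 512 ≤ fuel →
    pvPadLoopF fuel l = l ++ List.replicate ((960 - l.length % 512) % 512) '0' := by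
  induction fuel with
  | zero =>
    intro l h
    rw [show (960 - l.length % 512) % 512 = 0 from by omega]
    simp [pvPadLoopF]
  | succ fuel ih =>
    intro l h
    rw [pvPadLoopF]
    split
    · rename_i h448
      rw [show (960 - l.length % 512) % 512 = 0 from by omega]
      simp
    · rename_i h448
      have hlen : (l ++ ['0']).length = l.length + 1 := by simp
      rw [ih (l ++ ['0']) (by rw [hlen]; omega)]
      have hc : (960 - (l ++ ['0']).length % 512) % 512 + 1 = (960 - l.length % 512) % 512 := by
        simp only [List.length_append, List.length_cons, List.length_nil]
        omega
      rw [← hc, List.append_assoc]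
      congr 1

theorem pv_padLoop_eq (l : List Char) :
    pvPadLoop l = l ++ List.replicate ((960 - l.length % 512) % 512) '0' :=
  pv_padLoopF_eq 512 l (by omega)

-- proof-only helper: the chunking of a list into 512-char pieces
def pvChunks (l : List Char) : List (List Char) :=
  if h : l = [] then [] else l.take 512 :: pvChunks (l.drop 512)
  termination_by l.length
  decreasing_by
    have := List.length_pos_of_ne_nil h
    simp only [List.length_drop]
    omega

theorem pv_chunks_map (k : Nat) : ∀ l : List Char, l.length = 512 * k →
    pvChunks l = (List.range k).map (fun j => (l.drop (512 * j)).take 512) := by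
  induction k with
  | zero =>
    intro l hl
    have : l = [] := List.eq_nil_of_length_eq_zero (by omega)
    subst this
    rw [pvChunks]
    simp
  | succ k ih =>
    intro l hl
    have hne : l ≠ [] := by
      intro h; subst h; simp at hl
    rw [pvChunks, dif_neg hne, List.range_succ_eq_map, List.map_cons, List.map_map]
    congr 1
    rw [ih (l.drop 512) (by simp [List.length_drop]; omega)]
    apply List.map_congr_left
    intro j _
    simp only [Function.comp_apply, List.drop_drop]
    congr 2
    omega

theorem pv_chunks_flatten (l : List Char) : (pvChunks l).flatten = l := by
  fun_induction pvChunks l with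
  | case1 => simp
  | case2 l h ih => simp [ih, List.take_append_drop]

theorem pv_chunks_mem (l : List Char) (hd : 512 ∣ l.length) (hb : pvIsBin l) :
    ∀ b ∈ pvChunks l, b.length = 512 ∧ pvIsBin b := by
  fun_induction pvChunks l with
  | case1 => intro b hbm; simp at hbm
  | case2 l h ih =>
    intro b hbm
    have hpos := List.length_pos_of_ne_nil h
    have h512 : 512 ≤ l.length := by
      obtain ⟨c, hc⟩ := hd
      omega
    rcases List.mem_cons.1 hbm with rfl | hbm
    · refine ⟨by simp [List.length_take]; omega, ?_⟩
      intro c hc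
      exact hb c (List.mem_of_mem_take hc)
    · refine ih ?_ ?_ b hbm
      · obtain ⟨c, hc⟩ := hd
        exact ⟨c - 1, by simp [List.length_drop]; omega⟩
      · intro c hc
        exact hb c (List.mem_of_mem_drop hc)

theorem pv_chunks_length (l : List Char) (k : Nat) (h : l.length = 512 * k) :
    (pvChunks l).length = k := by
  rw [pv_chunks_map k l h]
  simp

-- A's block comprehension is the chunking
theorem pv_blocks_eq (l : List Char) (k : Nat) (h : l.length = 512 * k) :
    (PySem.List.pyRange 0 (l.length : Int) 512).map
      (fun i => PySem.List.slice l (some i) (some (i + 512))) = pvChunks l := by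
  by_cases hk : k = 0
  · subst hk
    have hnil : l = [] := List.eq_nil_of_length_eq_zero (by omega)
    subst hnil
    rw [pvChunks]
    rw [show ((List.length ([] : List Char) : Int)) = 0 from by simp]
    rw [PySem.List.pyRange_of_pos 0 0 (by norm_num)]
    simp
  · rw [pv_chunks_map k l h, PySem.List.pyRange_of_pos 0 _ (by norm_num)]
    have hcount : (if (0:Int) < (l.length : Int) then
        (((l.length : Int) - 0 + 512 - 1) / 512).toNat else 0) = k := by
      rw [h]
      rw [if_pos (by push_cast; omega)]
      push_cast
      omega
    rw [hcount, List.map_map]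
    apply List.map_congr_left
    intro j hj
    simp only [Function.comp_apply]
    have e1 : (0:Int) + 512 * (j : Int) = ((512 * j : Nat) : Int) := by push_cast; ring
    rw [e1]
    have e2 : ((512 * j : Nat) : Int) + 512 = ((512 * j : Nat) : Int) + ((512 : Nat) : Int) := by
      norm_num
    rw [e2, PySem.List.slice_natCast_add]

-- XOR-folding the 512-bit windows of the value of the flattened blocks is
-- XOR-folding the values of the blocks
theorem pv_win_fold (bs : List (List Char)) (hb : ∀ b ∈ bs, b.length = 512 ∧ pvIsBin b)
    (x : Nat) :
    ((List.range bs.length).reverse).foldl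
      (fun a i => Nat.xor a ((pvVal bs.flatten >>> (512 * i)) &&& (2 ^ 512 - 1))) x
    = bs.foldl (fun a b => Nat.xor a (pvVal b)) x := by
  revert hb x
  induction bs using List.reverseRecOn with
  | nil => intro hb x; simp
  | append_singleton bs b ih =>
    intro hb x
    obtain ⟨hlb, hbinb⟩ := hb b (by simp)
    have hb' : ∀ c ∈ bs, c.length = 512 ∧ pvIsBin c := fun c hc => hb c (by simp [hc])
    have hv : pvVal b < 2 ^ 512 := hlb ▸ pv_val_lt b hbinb
    have hflat : pvVal (bs ++ [b]).flatten = pvVal bs.flatten * 2 ^ 512 + pvVal b := by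
      rw [List.flatten_append, List.flatten_cons, List.flatten_nil, List.append_nil,
        pv_val_append, hlb]
    have hshift : ∀ i, (pvVal (bs ++ [b]).flatten >>> (512 * (i + 1)))
        = pvVal bs.flatten >>> (512 * i) := by
      intro i
      rw [hflat, Nat.shiftRight_eq_div_pow, Nat.shiftRight_eq_div_pow,
        show 512 * (i + 1) = 512 + 512 * i from by ring, pow_add,
        ← Nat.div_div_eq_div_mul]
      congr 1
      rw [mul_comm (pvVal bs.flatten) ((2:Nat) ^ 512), Nat.add_comm,
        Nat.add_mul_div_left _ _ (by positivity), Nat.div_eq_of_lt hv]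
      omega
    have hwin0 : (pvVal (bs ++ [b]).flatten >>> (512 * 0)) &&& (2 ^ 512 - 1) = pvVal b := by
      rw [Nat.mul_zero, Nat.shiftRight_zero, Nat.and_two_pow_sub_one_eq_mod, hflat,
        mul_comm (pvVal bs.flatten) ((2:Nat) ^ 512), Nat.mul_add_mod, Nat.mod_eq_of_lt hv]
    have hlen : (bs ++ [b]).length = bs.length + 1 := by simp
    rw [hlen, List.range_succ_eq_map, List.reverse_cons, List.foldl_append,
      ← List.map_reverse, List.foldl_map]
    have hfun : (fun (a : Nat) (i : Nat) =>
          Nat.xor a ((pvVal (bs ++ [b]).flatten >>> (512 * (Nat.succ i))) &&& (2 ^ 512 - 1)))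
        = (fun a i => Nat.xor a ((pvVal bs.flatten >>> (512 * i)) &&& (2 ^ 512 - 1))) := by
      funext a i
      rw [show Nat.succ i = i + 1 from rfl, hshift]
    rw [hfun, ih hb']
    rw [List.foldl_append]
    simp only [List.foldl_cons, List.foldl_nil]
    rw [hwin0]

-- proof-only abbreviations for A's intermediate strings
def pvBS (s : String) : List Char := ((pvBytes s).map (fun b => pvZfill 8 (pvBinRepr b))).flatten

def pvZ (s : String) : Nat := (960 - ((pvBS s).length + 1) % 512) % 512

def pvPadded (s : String) : List Char :=
  ((pvBS s ++ ['1']) ++ List.replicate (pvZ s) '0') ++ pvZfill 64 (pvBinRepr (pvBS s).length)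

theorem pv_bs_facts (bytes : List Nat) (h : ∀ b ∈ bytes, b < 256) :
    ((bytes.map (fun b => pvZfill 8 (pvBinRepr b))).flatten).length = 8 * bytes.length ∧
      pvIsBin ((bytes.map (fun b => pvZfill 8 (pvBinRepr b))).flatten) ∧
      pvVal ((bytes.map (fun b => pvZfill 8 (pvBinRepr b))).flatten)
        = bytes.foldl (fun a b => 256 * a + b) 0 := by
  induction bytes using List.reverseRecOn with
  | nil => refine ⟨by simp, by intro c hc; simp at hc, by simp [pvVal]⟩
  | append_singleton bytes b ih =>
    have hb : b < 256 := h b (by simp)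
    have h' : ∀ c ∈ bytes, c < 256 := fun c hc => h c (by simp [hc])
    obtain ⟨ihl, ihb, ihv⟩ := ih h'
    have hblen : (pvZfill 8 (pvBinRepr b)).length = 8 :=
      pv_len_zfill _ _ (pv_binRepr_len_le b 8 (by norm_num) (by norm_num; omega))
    have hbval : pvVal (pvZfill 8 (pvBinRepr b)) = b := by
      rw [pv_val_zfill, pv_binRepr_val]
    have hbbin : pvIsBin (pvZfill 8 (pvBinRepr b)) := pv_isBin_zfill _ _ (pv_binRepr_isBin b)
    have hfl : ((bytes ++ [b]).map (fun b => pvZfill 8 (pvBinRepr b))).flatten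
        = (bytes.map (fun b => pvZfill 8 (pvBinRepr b))).flatten ++ pvZfill 8 (pvBinRepr b) := by
      simp
    refine ⟨?_, ?_, ?_⟩
    · rw [hfl]; simp [ihl, hblen]; ring
    · rw [hfl]
      intro c hc
      rcases List.mem_append.1 hc with hc | hc
      · exact ihb c hc
      · exact hbbin c hc
    · rw [hfl, pv_val_append, hblen, hbval, ihv, List.foldl_append]
      simp [mul_comm]

theorem pv_padded_facts (s : String) (hby : ∀ b ∈ pvBytes s, b < 256)
    (hL : 8 * (pvBytes s).length < 2 ^ 64) :
    (pvPadded s).length = 8 * (pvBytes s).length + 1 + pvZ s + 64 ∧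
      pvIsBin (pvPadded s) ∧
      pvVal (pvPadded s)
        = (2 * ((pvBytes s).foldl (fun a b => 256 * a + b) 0) + 1) * 2 ^ (pvZ s + 64)
            + 8 * (pvBytes s).length := by
  obtain ⟨hbl, hbb, hbv⟩ := pv_bs_facts (pvBytes s) hby
  have hbl' : (pvBS s).length = 8 * (pvBytes s).length := hbl
  have hbb' : pvIsBin (pvBS s) := hbb
  have hbv' : pvVal (pvBS s) = (pvBytes s).foldl (fun a b => 256 * a + b) 0 := hbv
  have hz64len : (pvZfill 64 (pvBinRepr (pvBS s).length)).length = 64 :=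
    pv_len_zfill _ _ (pv_binRepr_len_le _ 64 (by norm_num) (by rw [hbl']; exact hL))
  have hz64val : pvVal (pvZfill 64 (pvBinRepr (pvBS s).length)) = 8 * (pvBytes s).length := by
    rw [pv_val_zfill, pv_binRepr_val, hbl']
  refine ⟨?_, ?_, ?_⟩
  · simp only [pvPadded, List.length_append, List.length_cons, List.length_nil,
      List.length_replicate, hz64len]
    omega
  · intro c hc
    simp only [pvPadded, List.append_assoc, List.mem_append] at hc
    rcases hc with hc | hc | hc | hc
    · exact hbb' c hc
    · simp only [List.mem_singleton] at hc; subst hc; right; rfl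
    · left; exact List.eq_of_mem_replicate hc
    · exact pv_isBin_zfill _ _ (pv_binRepr_isBin _) c hc
  · rw [pvPadded, pv_val_append, hz64len, hz64val, pv_val_append, pv_val_replicate,
      List.length_replicate, pv_val_append, hbv']
    rw [show pvVal ['1'] = 1 from by decide]
    simp only [List.length_cons, List.length_nil, pow_one]
    rw [pow_add]
    ring

theorem text_to_512_block_spec : Claim_equal_text_to_512_block := by
  intro s hdom hpre
  unfold Spec_text_to_512_block
  -- bytes are ASCII codes < 256 on Dom
  have hby : ∀ b ∈ pvBytes s, b < 256 := by
    intro b hbm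
    simp only [pvBytes, List.mem_map] at hbm
    obtain ⟨c, hc, rfl⟩ := hbm
    have hall := List.all_eq_true.mp hdom c hc
    simp only [pvDomChar, Bool.or_eq_true, Bool.and_eq_true, decide_eq_true_eq,
      beq_iff_eq] at hall
    omega
  have hL : 8 * (pvBytes s).length < 2 ^ 64 := by
    have h1 : (pvBytes s).length = s.length := by
      simp [pvBytes, s.length_toList]
    have h2 : s.length < 2 ^ 61 := hpre
    have h3 : (2 : Nat) ^ 64 = 8 * 2 ^ 61 := by norm_num
    omega
  obtain ⟨hlenP, hbinP, hvalP⟩ := pv_padded_facts s hby hL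
  obtain ⟨hbsl, hbsb, hbsv⟩ := pv_bs_facts (pvBytes s) hby
  have hz448 : (8 * (pvBytes s).length + 1 + pvZ s) % 512 = 448 := by
    have : (pvBS s).length = 8 * (pvBytes s).length := hbsl
    unfold pvZ
    omega
  obtain ⟨k, hk⟩ : ∃ k, 8 * (pvBytes s).length + 1 + pvZ s + 64 = 512 * k :=
    ⟨(8 * (pvBytes s).length + 1 + pvZ s + 64) / 512, by omega⟩
  have hk1 : 1 ≤ k := by omega
  have hlen512 : (pvPadded s).length = 512 * k := by omega
  have hchlen : (pvChunks (pvPadded s)).length = k := pv_chunks_length _ k hlen512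
  have hflatP : (pvChunks (pvPadded s)).flatten = pvPadded s := pv_chunks_flatten _
  have hchmem : ∀ b ∈ pvChunks (pvPadded s), b.length = 512 ∧ pvIsBin b :=
    pv_chunks_mem _ ⟨k, hlen512⟩ hbinP
  -- characterize A
  have hA : text_to_512_block s = String.ofList (pvZfill 512 (pvBinRepr
      ((pvChunks (pvPadded s)).foldl (fun a b => Nat.xor a (pvVal b)) 0))) := by
    unfold text_to_512_block
    simp only []
    rw [pv_padLoop_eq]
    rw [show (List.map (fun b => pvZfill 8 (pvBinRepr b)) (pvBytes s)).flatten = pvBS s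
      from rfl]
    have hpadeq : (pvBS s ++ ['1']) ++
        List.replicate ((960 - (pvBS s ++ ['1']).length % 512) % 512) '0' ++
        pvZfill 64 (pvBinRepr (pvBS s).length) = pvPadded s := by
      simp only [pvPadded, pvZ, List.length_append, List.length_cons, List.length_nil]
    rw [hpadeq]
    rw [pv_blocks_eq (pvPadded s) k hlen512]
    by_cases h1 : (pvChunks (pvPadded s)).length = 1
    · rw [if_pos h1]
      have hk1' : k = 1 := by omega
      have hle : (pvPadded s).length ≤ 512 := by omega
      have hone : pvChunks (pvPadded s) = [pvPadded s] := by
        rw [pv_chunks_map k _ hlen512, hk1']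
        simp [List.take_of_length_le hle]
      rw [hone]
      simp only [List.headD_cons, List.foldl_cons, List.foldl_nil]
      rw [show Nat.xor 0 (pvVal (pvPadded s)) = pvVal (pvPadded s) from Nat.zero_xor _]
      rw [pv_canon (pvPadded s) 512 (by norm_num) hbinP (by omega)]
    · rw [if_neg h1]
      obtain ⟨b0, rest, hcons⟩ : ∃ b0 rest, pvChunks (pvPadded s) = b0 :: rest := by
        cases hch : pvChunks (pvPadded s) with
        | nil => rw [hch] at hchlen; simp at hchlen; omega
        | cons b0 rest => exact ⟨b0, rest, rfl⟩
      rw [hcons]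
      simp only [List.headD_cons, List.drop_one, List.tail_cons, List.drop_succ_cons,
        List.drop_zero, List.foldl_cons]
      rw [show Nat.xor 0 (pvVal b0) = pvVal b0 from Nat.zero_xor _]
  -- characterize B
  have hB : text_to_512_block_alt s = String.ofList (pvZfill 512 (pvBinRepr
      ((pvChunks (pvPadded s)).foldl (fun a b => Nat.xor a (pvVal b)) 0))) := by
    unfold text_to_512_block_alt
    simp only []
    have hzB : (PySem.Int.mod (448 - ((8 * (pvBytes s).length : Nat) : Int) - 1) 512).toNat
        = pvZ s := by
      rw [PySem.Int.mod_eq_emod_of_pos (by norm_num : (0:Int) < 512)]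
      have : (pvBS s).length = 8 * (pvBytes s).length := hbsl
      unfold pvZ
      omega
    rw [hzB]
    have hbig : (2 * ((pvBytes s).foldl (fun a b => 256 * a + b) 0) + 1) <<< (pvZ s + 64)
        + 8 * (pvBytes s).length = pvVal ((pvChunks (pvPadded s)).flatten) := by
      rw [hflatP, hvalP, Nat.shiftLeft_eq]
    rw [hbig]
    rw [show (8 * (pvBytes s).length + 1 + pvZ s + 64) / 512
        = (pvChunks (pvPadded s)).length from by omega]
    rw [show (1 <<< 512 - 1 : Nat) = 2 ^ 512 - 1 from by rw [Nat.shiftLeft_eq, one_mul]]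
    rw [pv_win_fold _ hchmem 0]
  rw [hA, hB]
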